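-- pv_equiv track=rewrite | github.com/dyi919/algorithm-practice | practice/2023_01/230119_Programmers_Assessment/230119_Programmers_Assessment.py | solution
-- ===== SOURCE A (Python) =====
-- from bisect import bisect_right
--
-- def solution(scores):
--     answer = 0
--     score = scores[0]
--     ans_score = sum(score)
--     scores_sorted = sorted(scores, reverse=True, key=lambda x: [x[0], -x[1]])
--     total_scores = [sum(scores_sorted[0])]
--
--     count = len(scores_sorted)
--     prev = 0
--     i = 1
--
--     while i < count:
--         prev_b, prev_p = scores_sorted[prev]
--         cur_b, cur_p = scores_sorted[i]
--
--         if prev_b > cur_b and prev_p > cur_p: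
--             if score == scores_sorted[i]: return -1
--         else:
--             total_scores.append(sum(scores_sorted[i]))
--             prev = i
--
--         i += 1
--
--     total_scores.sort()
--     return len(total_scores) - bisect_right(total_scores, ans_score) + 1
-- ===== SOURCE B (Python) =====
-- def solution(scores):
--     score = scores[0]
--     ans_score = sum(score)
--     scores_sorted = sorted(scores, reverse=True, key=lambda x: [x[0], -x[1]])
--     prev_b, prev_p = scores_sorted[0]
--     rank = 2 if prev_b + prev_p > ans_score else 1
--     for cur in scores_sorted[1:]:
--         cur_b, cur_p = cur
--         if prev_b > cur_b and prev_p > cur_p: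
--             if score == cur:
--                 return -1
--         else:
--             if cur_b + cur_p > ans_score:
--                 rank += 1
--             prev_b, prev_p = cur_b, cur_p
--     return rank
-- ===== Notes on version B (the rewrite author's own statement) =====
-- stated objective: simpler
-- what changed: B keeps the same sort and Pareto sweep but maintains a running rank counter (incremented when a surviving point's sum exceeds the first element's sum) instead of A's building a list of sums, sorting it again and binary-searching with bisect_right.
-- outside the precondition, e.g. on solution([[1, 2, 3]]): A returns 1, B raises ValueError
import Mathlib
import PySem

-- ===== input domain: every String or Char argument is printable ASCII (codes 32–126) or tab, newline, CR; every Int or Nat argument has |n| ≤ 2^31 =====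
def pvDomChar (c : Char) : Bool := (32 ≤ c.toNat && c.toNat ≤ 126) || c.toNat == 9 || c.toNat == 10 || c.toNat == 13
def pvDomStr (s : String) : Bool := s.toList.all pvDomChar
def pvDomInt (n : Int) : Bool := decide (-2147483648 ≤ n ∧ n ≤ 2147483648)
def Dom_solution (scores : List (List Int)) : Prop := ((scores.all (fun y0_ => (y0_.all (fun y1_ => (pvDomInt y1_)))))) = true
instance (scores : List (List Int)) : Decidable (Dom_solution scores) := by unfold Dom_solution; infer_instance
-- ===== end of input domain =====

-- B replaces A's second sort + bisect_right with a running rank counter kept during the same sweep (simpler; return value only).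

-- ===== PORT A =====
-- A's while loop: state = (total_scores, prev, i); on exit it sorts total_scores and applies bisect_right.
-- The Python key 'lambda x: [x[0], -x[1]]' compares int lists lexicographically, exact here as the tuple key of sorted2.
def solutionLoopA (ss : List (List Int)) (score : List Int) (ansScore : Int) (count : Nat)
    (total : List Int) (prev i : Nat) : Int :=
  if i < count then
    let prevRow := PySem.List.pyGetD ss (prev : Int) []
    let prev_b := PySem.List.pyGetD prevRow 0 0
    let prev_p := PySem.List.pyGetD prevRow 1 0
    let curRow := PySem.List.pyGetD ss (i : Int) []
    let cur_b := PySem.List.pyGetD curRow 0 0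
    let cur_p := PySem.List.pyGetD curRow 1 0
    if prev_b > cur_b ∧ prev_p > cur_p then
      if score = curRow then -1
      else solutionLoopA ss score ansScore count total prev (i + 1)
    else solutionLoopA ss score ansScore count (total ++ [curRow.sum]) i (i + 1)
  else
    let ts := PySem.List.sorted total (fun x => x) false
    (ts.length : Int) - (PySem.List.bisectRight ts ansScore : Int) + 1
termination_by count - i

def solution (scores : List (List Int)) : Int :=
  let score := PySem.List.pyGetD scores 0 []
  let ansScore := score.sum
  let ss := PySem.List.sorted2 scores (fun x => PySem.List.pyGetD x 0 0) (fun x => -(PySem.List.pyGetD x 1 0)) true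
  let total := [(PySem.List.pyGetD ss 0 []).sum]
  solutionLoopA ss score ansScore ss.length total 0 1

-- ===== PORT B =====
-- B's for-loop over scores_sorted[1:]: state = (prev_b, prev_p, rank).
def solutionLoopB (score : List Int) (ansScore pb pp rank : Int) : List (List Int) → Int
  | [] => rank
  | cur :: rest =>
    let cur_b := PySem.List.pyGetD cur 0 0
    let cur_p := PySem.List.pyGetD cur 1 0
    if pb > cur_b ∧ pp > cur_p then
      if score = cur then -1
      else solutionLoopB score ansScore pb pp rank rest
    else solutionLoopB score ansScore cur_b cur_p
      (if cur_b + cur_p > ansScore then rank + 1 else rank) rest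

def solution_alt (scores : List (List Int)) : Int :=
  let score := PySem.List.pyGetD scores 0 []
  let ansScore := score.sum
  let ss := PySem.List.sorted2 scores (fun x => PySem.List.pyGetD x 0 0) (fun x => -(PySem.List.pyGetD x 1 0)) true
  let first := PySem.List.pyGetD ss 0 []
  let pb := PySem.List.pyGetD first 0 0
  let pp := PySem.List.pyGetD first 1 0
  let rank : Int := if pb + pp > ansScore then 2 else 1
  solutionLoopB score ansScore pb pp rank (PySem.List.slice ss (some 1) none)

-- ===== PRECONDITION & SPEC =====
-- Pre_ excludes the empty list (scores[0] raises IndexError) and rows whose length is not 2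
-- (the key lambda raises IndexError on short rows; tuple unpacking raises ValueError on rows of other lengths;
-- the only narrowing: a SINGLETON list whose one row is longer than 2, where A returns but B's unpacking raises).
def Pre_solution (scores : List (List Int)) : Prop :=
  scores ≠ [] ∧ ∀ r ∈ scores, r.length = 2
instance (scores : List (List Int)) : Decidable (Pre_solution scores) := by unfold Pre_solution; infer_instance
def pvWitness_solution : List (List Int) := [[1, 2], [3, 4]]
def Spec_solution (scores : List (List Int)) (out : Int) : Prop := out = solution_alt scores
instance (scores : List (List Int)) (out : Int) : Decidable (Spec_solution scores out) := by unfold Spec_solution; infer_instance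

-- ===== CLAIM (what is proved, stated in full; the proofs are below) =====
def Claim_equal_solution : Prop := ∀ (scores : List (List Int)), Dom_solution scores → Pre_solution scores → Spec_solution scores (solution scores)

-- ===== LEMMAS AND PROOFS =====

-- 'len(total) - bisect_right(sorted(total), a) + 1' counts the elements of total strictly above a, plus one.
lemma finish_eq (total : List Int) (ans : Int) :
    ((PySem.List.sorted total (fun x => x) false).length : Int)
      - (PySem.List.bisectRight (PySem.List.sorted total (fun x => x) false) ans : Int) + 1
    = 1 + (total.countP (fun x => decide (ans < x)) : Int) := by
  set ts := PySem.List.sorted total (fun x => x) false with hts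
  have hperm : ts.Perm total := PySem.List.sorted_perm total (fun x => x) false
  have hpair : ts.Pairwise (fun a b => a ≤ b) := by
    simpa using PySem.List.sorted_pairwise total (fun x => x)
  obtain ⟨hk, hle, hgt⟩ := PySem.List.bisectRight_spec ts ans hpair
  set k := PySem.List.bisectRight ts ans with hkdef
  have hcount : total.countP (fun x => decide (ans < x)) = ts.length - k := by
    rw [← hperm.countP_eq]
    have hsplit : ts = ts.take k ++ ts.drop k := (List.take_append_drop k ts).symm
    rw [hsplit, List.countP_append]
    have h1 : (ts.take k).countP (fun x => decide (ans < x)) = 0 := by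
      rw [List.countP_eq_zero]
      intro a ha
      obtain ⟨j, hj, rfl⟩ := List.mem_iff_getElem.mp ha
      have hjk : j < k := by
        have := hj; simp [List.length_take] at this; omega
      have hjlen : j < ts.length := lt_of_lt_of_le hjk hk
      have := hle j hjlen hjk
      simp only [List.getElem_take]
      simpa using this
    have h2 : (ts.drop k).countP (fun x => decide (ans < x)) = (ts.drop k).length := by
      rw [List.countP_eq_length]
      intro a ha
      obtain ⟨j, hj, rfl⟩ := List.mem_iff_getElem.mp ha
      have hjlen : k + j < ts.length := by
        have := hj; simp [List.length_drop] at this; omega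
      have := hgt (k + j) hjlen (by omega)
      simp only [List.getElem_drop]
      simpa using this
    rw [h1, h2]
    simp [List.length_drop]
  rw [hcount]
  have : k ≤ ts.length := hk
  push_cast [Nat.cast_sub this]
  ring


-- main loop invariant: A's loop from state (total, prev, i) equals B's loop over drop i with rank = 1 + #{x ∈ total | x > ans}
lemma loop_eq (ss : List (List Int)) (h2 : ∀ r ∈ ss, r.length = 2)
    (score : List Int) (ans : Int) :
    ∀ (n i prev : Nat) (total : List Int), ss.length - i ≤ n → prev < ss.length →
    solutionLoopA ss score ans ss.length total prev i
      = solutionLoopB score ans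
          (PySem.List.pyGetD (PySem.List.pyGetD ss (prev : Int) []) 0 0)
          (PySem.List.pyGetD (PySem.List.pyGetD ss (prev : Int) []) 1 0)
          (1 + (total.countP (fun x => decide (ans < x)) : Int)) (ss.drop i) := by
  intro n
  induction n with
  | zero =>
    intro i prev total hni hprev
    have hige : ss.length ≤ i := by omega
    have hnotlt : ¬ i < ss.length := by omega
    rw [solutionLoopA, if_neg hnotlt, List.drop_eq_nil_of_le hige, solutionLoopB,
      finish_eq]
  | succ n ih =>
    intro i prev total hni hprev
    by_cases hi : i < ss.length
    · have hcur : PySem.List.pyGetD ss (i : Int) [] = ss[i] := by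
        simp [PySem.List.pyGetD_natCast, hi]
      have hdrop : ss.drop i = ss[i] :: ss.drop (i + 1) := List.drop_eq_getElem_cons hi
      obtain ⟨a, b, hab⟩ := List.length_eq_two.mp (h2 ss[i] (ss.getElem_mem hi))
      have hcb : PySem.List.pyGetD ss[i] 0 0 = a := by
        rw [hab]; simp [PySem.List.pyGetD_zero_cons]
      have hcp : PySem.List.pyGetD ss[i] 1 0 = b := by
        rw [hab]
        rw [show (1 : Int) = ((1 : Nat) : Int) from rfl, PySem.List.pyGetD_natCast]
        rfl
      have hsum : (ss[i]).sum = a + b := by rw [hab]; simp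
      rw [solutionLoopA, if_pos hi, hdrop, solutionLoopB]
      simp only [hcur, hcb, hcp]
      by_cases hdom : PySem.List.pyGetD (PySem.List.pyGetD ss (prev : Int) []) 0 0 > a ∧
          PySem.List.pyGetD (PySem.List.pyGetD ss (prev : Int) []) 1 0 > b
      · rw [if_pos hdom, if_pos hdom]
        by_cases heq : score = ss[i]
        · rw [if_pos heq, if_pos heq]
        · rw [if_neg heq, if_neg heq]
          exact ih (i + 1) prev total (by omega) hprev
      · rw [if_neg hdom, if_neg hdom]
        have := ih (i + 1) i (total ++ [(ss[i]).sum]) (by omega) hi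
        rw [this, hcur, hcb, hcp]
        congr 1
        rw [List.countP_append, hsum]
        simp only [List.countP_cons, List.countP_nil]
        split_ifs with h h' h'
        · push_cast; ring
        · simp at h h'; omega
        · simp at h h'; omega
        · push_cast; ring
    · have hnotlt : ¬ i < ss.length := hi
      have hige : ss.length ≤ i := by omega
      rw [solutionLoopA, if_neg hnotlt, List.drop_eq_nil_of_le hige, solutionLoopB,
        finish_eq]


-- ===== VERDICT (by name: the statement is the Claim_ definition above) =====
theorem solution_spec : Claim_equal_solution := by
  intro scores _ hpre
  obtain ⟨hne, h2⟩ := hpre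
  unfold Spec_solution solution solution_alt
  dsimp only
  set score := PySem.List.pyGetD scores 0 [] with hscore
  set ans := score.sum with hans
  set ss := PySem.List.sorted2 scores (fun x => PySem.List.pyGetD x 0 0)
      (fun x => -(PySem.List.pyGetD x 1 0)) true with hss
  have hperm : ss.Perm scores := PySem.List.sorted2_perm scores _ _ true
  have hss2 : ∀ r ∈ ss, r.length = 2 := fun r hr => h2 r (hperm.mem_iff.mp hr)
  have hpos : 0 < ss.length := by
    rw [hperm.length_eq]; exact List.length_pos_of_ne_nil hne
  obtain ⟨c, t, hct⟩ := List.exists_cons_of_ne_nil (List.ne_nil_of_length_pos hpos)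
  have hfirst : PySem.List.pyGetD ss 0 [] = c := by
    rw [hct]; exact PySem.List.pyGetD_zero_cons c t []
  obtain ⟨a, b, hab⟩ := List.length_eq_two.mp (hss2 c (hct ▸ List.mem_cons_self))
  have hcb : PySem.List.pyGetD c 0 0 = a := by rw [hab]; exact PySem.List.pyGetD_zero_cons a [b] 0
  have hcp : PySem.List.pyGetD c 1 0 = b := by
    rw [hab, show (1 : Int) = ((1 : Nat) : Int) from rfl, PySem.List.pyGetD_natCast]; rfl
  have hsum : c.sum = a + b := by rw [hab]; simp
  have key := loop_eq ss hss2 score ans ss.length 1 0 [c.sum] (by omega) hpos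
  rw [show ((0 : Nat) : Int) = (0 : Int) from rfl, hfirst] at key
  rw [hfirst, key, PySem.List.slice_from_one, ← List.drop_one]
  congr 1
  rw [hcb, hcp, hsum]
  by_cases h : ans < a + b
  · simp [h]
  · simp [h]
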